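-- pv_equiv track=rewrite | github.com/Herophillix/cp1404practicals | prac_04/memberwise_addition.py | add_memberwise
-- ===== SOURCE A (Python) =====
-- def add_memberwise(numbers_1, numbers_2):
--     new_numbers = []
--     smaller_numbers = numbers_1 if len(numbers_1) < len(numbers_2) else numbers_2
--     larger_numbers = numbers_1 if smaller_numbers is numbers_2 else numbers_2
--     new_numbers = larger_numbers.copy()
--     for i in range(len(smaller_numbers)):
--         new_numbers[i] += smaller_numbers[i]
--     return new_numbers
-- ===== SOURCE B (Python) =====
-- def add_memberwise(numbers_1, numbers_2):
--     n1, n2 = len(numbers_1), len(numbers_2)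
--     return [(numbers_1[i] if i < n1 else 0) + (numbers_2[i] if i < n2 else 0)
--             for i in range(max(n1, n2))]
-- ===== Notes on version B (the rewrite author's own statement) =====
-- stated objective: simpler
-- what changed: B removes A's smaller/larger case split and copy-then-mutate loop entirely: one padded pass over range(max(len1,len2)) adding numbers_1[i] and numbers_2[i] with a missing element treated as 0 (valid since the elements are ints, so addition is commutative).
import Mathlib
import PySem

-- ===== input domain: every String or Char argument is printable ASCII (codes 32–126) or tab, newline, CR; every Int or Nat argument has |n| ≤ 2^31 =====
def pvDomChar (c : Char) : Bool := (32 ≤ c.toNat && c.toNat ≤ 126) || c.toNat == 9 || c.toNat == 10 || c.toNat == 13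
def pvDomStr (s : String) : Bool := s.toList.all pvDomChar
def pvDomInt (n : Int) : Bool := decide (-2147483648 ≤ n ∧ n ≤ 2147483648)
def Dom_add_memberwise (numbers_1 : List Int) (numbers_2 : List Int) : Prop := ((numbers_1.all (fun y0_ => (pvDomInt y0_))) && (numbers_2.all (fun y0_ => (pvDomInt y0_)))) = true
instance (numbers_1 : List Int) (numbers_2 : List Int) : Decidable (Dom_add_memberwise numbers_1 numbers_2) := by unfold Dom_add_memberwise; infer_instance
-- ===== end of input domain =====

-- B drops A's smaller/larger split and copy-then-mutate loop: one padded pass over range(max(len1,len2)), missing elements as 0 (ints, so addition commutes); return value only.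


-- ===== PORT A =====
-- for i in range(len(smaller)): new_numbers[i] += smaller[i] — indices 0..len-1 are always in
-- range of new_numbers (a copy of the longer list), so List.set/getD at the Nat index is exact.
def add_memberwise (numbers_1 : List Int) (numbers_2 : List Int) : List Int :=
  let smaller_numbers := if numbers_1.length < numbers_2.length then numbers_1 else numbers_2
  let larger_numbers := if numbers_1.length < numbers_2.length then numbers_2 else numbers_1
  let new_numbers := larger_numbers
  (List.range smaller_numbers.length).foldl
    (fun acc i => acc.set i (acc.getD i 0 + smaller_numbers.getD i 0)) new_numbers

-- ===== PORT B =====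
-- (numbers_1[i] if i < n1 else 0): i < n1 guarantees the index is in range, so getD is exact.
def add_memberwise_alt (numbers_1 : List Int) (numbers_2 : List Int) : List Int :=
  let n1 := numbers_1.length
  let n2 := numbers_2.length
  (List.range (max n1 n2)).map (fun i =>
    (if i < n1 then numbers_1.getD i 0 else 0) + (if i < n2 then numbers_2.getD i 0 else 0))

-- ===== PRECONDITION & SPEC =====
def Spec_add_memberwise (numbers_1 : List Int) (numbers_2 : List Int) (out : List Int) : Prop := out = add_memberwise_alt numbers_1 numbers_2
instance (numbers_1 : List Int) (numbers_2 : List Int) (out : List Int) : Decidable (Spec_add_memberwise numbers_1 numbers_2 out) := by unfold Spec_add_memberwise; infer_instance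

-- ===== CLAIM (what is proved, stated in full; the proofs are below) =====
def Claim_equal_add_memberwise : Prop := ∀ (numbers_1 : List Int) (numbers_2 : List Int), Dom_add_memberwise numbers_1 numbers_2 → Spec_add_memberwise numbers_1 numbers_2 (add_memberwise numbers_1 numbers_2)

-- ===== LEMMAS AND PROOFS =====

-- loop invariant: after k steps the first k slots hold the sums and the rest of l is untouched
theorem loop_inv (s l : List Int) (k : Nat) (hk : k ≤ s.length) (hkl : k ≤ l.length) :
    (List.range k).foldl (fun acc i => acc.set i (acc.getD i 0 + s.getD i 0)) l
      = ((l.zip s).map (fun ab => ab.1 + ab.2)).take k ++ l.drop k := by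
  induction k with
  | zero => simp
  | succ k ih =>
    rw [List.range_succ, List.foldl_append, ih (by omega) (by omega)]
    simp only [List.foldl_cons, List.foldl_nil]
    have hz : ((l.zip s).map (fun ab => ab.1 + ab.2)).length = min l.length s.length := by
      simp [List.length_zip]
    have hlen : (((l.zip s).map (fun ab => ab.1 + ab.2)).take k).length = k := by
      rw [List.length_take]; omega
    have hkl' : k < l.length := by omega
    have hks : k < s.length := by omega
    have hget : (((l.zip s).map (fun ab => ab.1 + ab.2)).take k ++ l.drop k).getD k 0 = l[k] := by
      rw [List.getD_eq_getElem?_getD, List.getElem?_append_right (by omega)]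
      simp [hlen, hkl']
    rw [hget]
    have hsget : s.getD k 0 = s[k] := by
      rw [List.getD_eq_getElem?_getD, List.getElem?_eq_getElem hks]; rfl
    rw [hsget]
    have hdrop : l.drop k = l[k] :: l.drop (k + 1) := List.drop_eq_getElem_cons hkl'
    rw [hdrop]
    rw [List.set_append_right _ _ (by omega), hlen]
    simp only [Nat.sub_self, List.set_cons_zero]
    have htake : ((l.zip s).map (fun ab => ab.1 + ab.2)).take (k + 1)
        = ((l.zip s).map (fun ab => ab.1 + ab.2)).take k ++ [(l.zip s).map (fun ab => ab.1 + ab.2) |>.get ⟨k, by omega⟩] := by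
      rw [List.take_add_one]
      simp [List.getElem?_eq_getElem (by omega : k < ((l.zip s).map (fun ab => ab.1 + ab.2)).length)]
    rw [htake, List.append_assoc]
    congr 1
    simp [List.getElem_zip]

theorem loop_eq (s l : List Int) (h : s.length ≤ l.length) :
    (List.range s.length).foldl (fun acc i => acc.set i (acc.getD i 0 + s.getD i 0)) l
      = (l.zip s).map (fun ab => ab.1 + ab.2) ++ l.drop s.length := by
  rw [loop_inv s l s.length le_rfl h]
  congr 1
  apply List.take_of_length_le
  simp [List.length_zip]

-- the zip-plus-tail form equals a single padded map over the longer list's indices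
theorem padded_eq (s l : List Int) (h : s.length ≤ l.length) :
    (l.zip s).map (fun ab => ab.1 + ab.2) ++ l.drop s.length
      = (List.range l.length).map (fun i => l.getD i 0 + (if i < s.length then s.getD i 0 else 0)) := by
  apply List.ext_getElem
  · simp [List.length_zip]; omega
  · intro i h1 h2
    have hil : i < l.length := by simpa using h2
    have hgl : l.getD i 0 = l[i] := by
      rw [List.getD_eq_getElem?_getD, List.getElem?_eq_getElem hil]; rfl
    have hzlen : ((l.zip s).map (fun ab => ab.1 + ab.2)).length = s.length := by
      simp [List.length_zip]; omega
    by_cases his : i < s.length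
    · rw [List.getElem_append_left (by omega)]
      simp [List.getElem_zip, his, List.getElem?_eq_getElem hil]
    · rw [List.getElem_append_right (by omega)]
      simp [hzlen, his, List.getElem_drop, List.getElem?_eq_getElem hil]
      congr 1
      omega

-- ===== VERDICT (by name: the statement is the Claim_ definition above) =====
theorem add_memberwise_spec : Claim_equal_add_memberwise := by
  intro n1 n2 _
  unfold Spec_add_memberwise add_memberwise add_memberwise_alt
  dsimp only
  by_cases h : n1.length < n2.length
  · simp only [h, if_pos]
    rw [loop_eq n1 n2 (by omega), padded_eq n1 n2 (by omega)]
    rw [show max n1.length n2.length = n2.length by omega]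
    apply List.map_congr_left
    intro i hi
    have : i < n2.length := List.mem_range.mp hi
    simp only [this, if_pos]
    ring
  · simp only [h, if_false]
    rw [loop_eq n2 n1 (by omega), padded_eq n2 n1 (by omega)]
    rw [show max n1.length n2.length = n1.length by omega]
    apply List.map_congr_left
    intro i hi
    have : i < n1.length := List.mem_range.mp hi
    simp [this]
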